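-- pv_equiv track=rewrite | github.com/daniel-reich/ubiquitous-fiesta | HBuWYyh5YCmDKF4uH_18.py | almost_sorted
-- ===== SOURCE A (Python) =====
-- def almost_sorted(lst):
--   t=[y-x>0 for x,y in zip(lst[:-1],lst[1:])]
--   if t.count(True)>t.count(False):
--     r=False
--   else:
--     r=True
--   if lst==sorted(lst,reverse=r):
--     return False
--   for i in range(len(lst)-1):
--     l=lst[:i]+lst[i+1:]
--     if l==sorted(l,reverse=r):
--       return True
--   return lst[:-1]==sorted(lst[:-1],reverse=r)
-- ===== SOURCE B (Python) =====
-- def almost_sorted(lst):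
--     # One pass: pick the majority direction, locate a monotonicity break,
--     # then only removal of one of the two offending positions can fix it.
--     pairs = list(zip(lst, lst[1:]))
--     inc = sum(1 for x, y in pairs if x < y)
--     asc = len(pairs) - inc < inc
--     ok = (lambda x, y: x <= y) if asc else (lambda x, y: y <= x)
--     bad = next((i for i, (x, y) in enumerate(pairs) if not ok(x, y)), None)
--     if bad is None:
--         return False  # already sorted in the majority direction
--
--     def sorted_without(j):
--         rest = lst[:j] + lst[j + 1:]
--         return all(ok(x, y) for x, y in zip(rest, rest[1:]))
--
--     return sorted_without(bad) or sorted_without(bad + 1)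
-- ===== Notes on version B (the rewrite author's own statement) =====
-- stated objective: faster
-- what changed: Instead of re-sorting the list after removing each index in turn, B counts the majority direction in one pass, locates one monotonicity break (j, j+1), and checks only the two removals (j and j+1) that could possibly fix it, each with a linear adjacent-pair scan.
import Mathlib
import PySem

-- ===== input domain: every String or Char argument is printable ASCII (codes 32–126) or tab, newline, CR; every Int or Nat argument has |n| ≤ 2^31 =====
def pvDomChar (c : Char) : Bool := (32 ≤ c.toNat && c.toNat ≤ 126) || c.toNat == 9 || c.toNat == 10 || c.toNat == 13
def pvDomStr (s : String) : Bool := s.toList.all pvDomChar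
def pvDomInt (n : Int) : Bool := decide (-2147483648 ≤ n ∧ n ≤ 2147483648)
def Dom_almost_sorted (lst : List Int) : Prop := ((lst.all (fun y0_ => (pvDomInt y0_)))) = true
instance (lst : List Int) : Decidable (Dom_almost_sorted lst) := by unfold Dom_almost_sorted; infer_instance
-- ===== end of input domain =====

-- B replaces A's try-every-removal-with-a-sort scan by a single-pass majority-direction
-- count plus the location of one monotonicity break: only removing one of the two offending
-- positions can fix the list, so two adjacent-pair checks suffice.


-- ===== PORT A =====
-- t=[y-x>0 for x,y in zip(lst[:-1],lst[1:])]; r = False if t.count(True)>t.count(False) else True;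
-- already sorted -> False; else try lst[:i]+lst[i+1:] for i in range(len-1); finally lst[:-1]
def almost_sorted (lst : List Int) : Bool :=
  let t : List Bool := ((PySem.List.slice lst none (some (-1))).zip
                        (PySem.List.slice lst (some 1) none)).map
                        (fun p => decide (p.2 - p.1 > 0))
  let r : Bool := if t.count false < t.count true then false else true
  if lst = PySem.List.sorted lst (fun x => x) r then false
  else if (PySem.List.pyRange 0 ((lst.length : Int) - 1) 1).any (fun i =>
      let l := PySem.List.slice lst none (some i) ++ PySem.List.slice lst (some (i + 1)) none
      decide (l = PySem.List.sorted l (fun x => x) r)) then true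
  else decide (PySem.List.slice lst none (some (-1))
        = PySem.List.sorted (PySem.List.slice lst none (some (-1))) (fun x => x) r)

-- ===== PORT B =====
-- ok = (lambda x, y: x <= y) if asc else (lambda x, y: y <= x)
def okDir (asc : Bool) (x y : Int) : Bool := if asc then decide (x ≤ y) else decide (y ≤ x)

-- sorted_without's test: all(ok(x, y) for x, y in zip(rest, rest[1:]))
def sortedW (asc : Bool) (l : List Int) : Bool := (l.zip l.tail).all (fun p => okDir asc p.1 p.2)

def almost_sorted_alt (lst : List Int) : Bool :=
  let pairs := lst.zip lst.tail
  let inc := pairs.countP (fun p => decide (p.1 < p.2))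
  let asc : Bool := decide (pairs.length - inc < inc)
  match pairs.findIdx? (fun p => ! okDir asc p.1 p.2) with
  | none => false
  | some j => sortedW asc (lst.eraseIdx j) || sortedW asc (lst.eraseIdx (j + 1))

-- ===== PRECONDITION & SPEC =====
def Spec_almost_sorted (lst : List Int) (out : Bool) : Prop := out = almost_sorted_alt lst
instance (lst : List Int) (out : Bool) : Decidable (Spec_almost_sorted lst out) := by unfold Spec_almost_sorted; infer_instance

-- ===== CLAIM (what is proved, stated in full; the proofs are below) =====
def Claim_equal_almost_sorted : Prop := ∀ (lst : List Int), Dom_almost_sorted lst → Spec_almost_sorted lst (almost_sorted lst)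

-- ===== LEMMAS AND PROOFS =====

-- zip of lst[:-1] with lst[1:] equals zip of lst with lst[1:] (zip truncates)
theorem zip_dropLast_tail (l : List Int) : l.dropLast.zip l.tail = l.zip l.tail := by
  induction l with
  | nil => rfl
  | cons a t ih =>
    cases t with
    | nil => rfl
    | cons b u =>
      simp only [List.dropLast_cons₂, List.zip_cons_cons, List.tail_cons] at ih ⊢
      rw [ih]

-- indexed characterisation of B's adjacent-pairs sortedness test
theorem sortedW_iff (asc : Bool) (l : List Int) :
    sortedW asc l = true ↔ ∀ i, (h : i + 1 < l.length) → okDir asc l[i] (l[i+1]'h) = true := by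
  unfold sortedW
  rw [List.all_eq_true]
  constructor
  · intro h i hi
    have hmem : (l[i], l[i+1]'hi) ∈ l.zip l.tail := by
      have hlen : i < (l.zip l.tail).length := by
        simp [List.length_zip, List.length_tail]; omega
      have := List.getElem_zip (l := l) (l' := l.tail) (i := i) (h := hlen)
      rw [List.getElem_tail] at this
      rw [← this]; exact List.getElem_mem hlen
    exact h _ hmem
  · intro h p hp
    rw [List.mem_iff_getElem] at hp
    obtain ⟨i, hi, hpe⟩ := hp
    have hi' : i + 1 < l.length := by
      simp [List.length_zip, List.length_tail] at hi; omega
    have := List.getElem_zip (l := l) (l' := l.tail) (i := i) (h := hi)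
    rw [List.getElem_tail] at this
    rw [← hpe, this]
    exact h i hi'

-- adjacent-pairs version of Pairwise for a transitive relation
theorem pairwise_of_adj {R : Int → Int → Prop}
    (htrans : ∀ a b c, R a b → R b c → R a c) (l : List Int)
    (h : ∀ i, (h : i + 1 < l.length) → R l[i] (l[i+1]'h)) : l.Pairwise R := by
  rw [List.pairwise_iff_getElem]
  intro i j hi hj hij
  induction j with
  | zero => omega
  | succ j ih =>
    by_cases hej : i = j
    · subst hej; exact h i hj
    · exact htrans _ _ _ (ih (by omega) (by omega)) (h j hj)

-- A's "l == sorted(l, reverse = not asc)" is B's sortedW test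
theorem sorted_eq_iff_sortedW (asc : Bool) (l : List Int) :
    (l = PySem.List.sorted l (fun x => x) (!asc)) ↔ sortedW asc l = true := by
  cases asc with
  | true =>
    constructor
    · intro h
      rw [sortedW_iff]
      intro i hi
      have h' : l = PySem.List.sorted l (fun x => x) false := by simpa using h
      have hp : l.Pairwise (fun a b : Int => a ≤ b) := by
        have := PySem.List.sorted_pairwise (xs := l) (key := fun x : Int => x)
        rw [← h'] at this; exact this
      rw [List.pairwise_iff_getElem] at hp
      simpa [okDir] using hp i (i+1) (by omega) hi (by omega)
    · intro h
      have hp : l.Pairwise (fun a b : Int => a ≤ b) := by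
        apply pairwise_of_adj (R := fun a b : Int => a ≤ b) (fun a b c hab hbc => le_trans hab hbc)
        intro i hi
        have := (sortedW_iff true l).mp h i hi
        simpa [okDir] using this
      have := PySem.List.sorted_eq_self_of_pairwise l (fun x => x) hp
      simpa using this.symm
  | false =>
    constructor
    · intro h
      rw [sortedW_iff]
      intro i hi
      have h' : l = PySem.List.sorted l (fun x => x) true := by simpa using h
      have hp : l.Pairwise (fun a b : Int => b ≤ a) := by
        have := PySem.List.sorted_pairwise_rev (xs := l) (key := fun x : Int => x)
        rw [← h'] at this; exact this
      rw [List.pairwise_iff_getElem] at hp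
      simpa [okDir] using hp i (i+1) (by omega) hi (by omega)
    · intro h
      have hp : l.Pairwise (fun a b : Int => b ≤ a) := by
        apply pairwise_of_adj (R := fun a b : Int => b ≤ a) (fun a b c hab hbc => le_trans hbc hab)
        intro i hi
        have := (sortedW_iff false l).mp h i hi
        simpa [okDir] using this
      have := PySem.List.sorted_rev_eq_self_of_pairwise l (fun x => x) hp
      simpa using this.symm

-- main lemma: a break at (j, j+1) can only be fixed by removing index j or j+1
theorem erase_not_sorted (asc : Bool) (lst : List Int) (j k : Nat)
    (hj : j + 1 < lst.length) (hbad : okDir asc lst[j] (lst[j+1]'hj) = false)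
    (hk : k < lst.length) (hkj : k ≠ j) (hkj1 : k ≠ j + 1) :
    sortedW asc (lst.eraseIdx k) = false := by
  have hlen : (lst.eraseIdx k).length = lst.length - 1 := by
    rw [List.length_eraseIdx_of_lt hk]
  by_contra hcon
  rw [Bool.not_eq_false, sortedW_iff] at hcon
  rcases Nat.lt_or_ge k j with hlt | hge
  · -- k < j : indices j-1, j in the erased list are lst[j], lst[j+1]
    have h1 : (j - 1) + 1 < (lst.eraseIdx k).length := by omega
    have := hcon (j - 1) h1
    rw [List.getElem_eraseIdx, List.getElem_eraseIdx] at this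
    rw [dif_neg (by omega), dif_neg (by omega)] at this
    have hj1 : j - 1 + 1 = j := by omega
    simp only [hj1] at this
    rw [this] at hbad; simp at hbad
  · -- k > j+1 : indices j, j+1 survive unchanged
    have hgt : j + 1 < k := by omega
    have h1 : j + 1 < (lst.eraseIdx k).length := by omega
    have := hcon j h1
    rw [List.getElem_eraseIdx, List.getElem_eraseIdx] at this
    rw [dif_pos (by omega), dif_pos (by omega)] at this
    rw [this] at hbad; simp at hbad

-- the common shape both ports are reduced to
def ascOf (lst : List Int) : Bool :=
  decide ((lst.zip lst.tail).length - (lst.zip lst.tail).countP (fun p => decide (p.1 < p.2))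
          < (lst.zip lst.tail).countP (fun p => decide (p.1 < p.2)))

def rhsFun (lst : List Int) : Bool :=
  if sortedW (ascOf lst) lst then false
  else decide (∃ k, k < lst.length ∧ sortedW (ascOf lst) (lst.eraseIdx k) = true)

theorem pairs_getElem (lst : List Int) (j : Nat) (hj : j < (lst.zip lst.tail).length) :
    (lst.zip lst.tail)[j] = (lst[j]'(by simp [List.length_zip] at hj ⊢; omega),
                             lst[j+1]'(by simp [List.length_zip, List.length_tail] at hj ⊢; omega)) := by
  rw [List.getElem_zip, List.getElem_tail]

theorem slice_erase (lst : List Int) (i : Int) (h : 0 ≤ i) :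
    PySem.List.slice lst none (some i) ++ PySem.List.slice lst (some (i + 1)) none
      = lst.eraseIdx i.toNat := by
  rw [PySem.List.slice_to lst h, PySem.List.slice_from lst (show (0:Int) ≤ i + 1 by omega),
    List.eraseIdx_eq_take_drop_succ]
  have : (i + 1).toNat = i.toNat + 1 := by omega
  rw [this]

theorem dropLast_erase (lst : List Int) :
    lst.dropLast = lst.eraseIdx (lst.length - 1) := by
  rw [List.eraseIdx_eq_take_drop_succ, List.dropLast_eq_take]
  cases lst with
  | nil => simp
  | cons a t =>
    have h : (a :: t).length - 1 + 1 = (a :: t).length := by simp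
    rw [h, List.drop_length, List.append_nil]

theorem B_char (lst : List Int) : almost_sorted_alt lst = rhsFun lst := by
  unfold almost_sorted_alt rhsFun
  dsimp only
  have hasc : (decide ((lst.zip lst.tail).length - (lst.zip lst.tail).countP (fun p => decide (p.1 < p.2))
      < (lst.zip lst.tail).countP (fun p => decide (p.1 < p.2)))) = ascOf lst := rfl
  rw [hasc]
  cases hfi : (lst.zip lst.tail).findIdx? (fun p => ! okDir (ascOf lst) p.1 p.2) with
  | none =>
    rw [List.findIdx?_eq_none_iff] at hfi
    have hsw : sortedW (ascOf lst) lst = true := by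
      unfold sortedW
      rw [List.all_eq_true]
      intro p hp
      have := hfi p hp
      simpa using this
    rw [if_pos hsw]
  | some j =>
    rw [List.findIdx?_eq_some_iff_findIdx_eq] at hfi
    obtain ⟨hjlen, hjfind⟩ := hfi
    have hjn : j + 1 < lst.length := by
      simp [List.length_zip, List.length_tail] at hjlen; omega
    have hbad : okDir (ascOf lst) (lst[j]'(by omega)) (lst[j+1]'hjn) = false := by
      have := List.findIdx_getElem (p := fun p => ! okDir (ascOf lst) p.1 p.2)
        (xs := lst.zip lst.tail) (w := by rw [hjfind]; exact hjlen)
      simp only [hjfind] at this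
      rw [pairs_getElem lst j hjlen] at this
      simpa using this
    have hnot : sortedW (ascOf lst) lst = false := by
      by_contra hc
      rw [Bool.not_eq_false, sortedW_iff] at hc
      have := hc j hjn
      rw [this] at hbad; simp at hbad
    rw [if_neg (by simp [hnot])]
    by_cases hdisj : sortedW (ascOf lst) (lst.eraseIdx j) = true ∨ sortedW (ascOf lst) (lst.eraseIdx (j+1)) = true
    · have hex : ∃ k, k < lst.length ∧ sortedW (ascOf lst) (lst.eraseIdx k) = true := by
        rcases hdisj with h | h
        · exact ⟨j, by omega, h⟩
        · exact ⟨j+1, by omega, h⟩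
      rw [decide_eq_true hex]
      rcases hdisj with h | h <;> simp [h]
    · rw [not_or] at hdisj
      obtain ⟨h1, h2⟩ := hdisj
      rw [Bool.not_eq_true] at h1 h2
      have hex : ¬ ∃ k, k < lst.length ∧ sortedW (ascOf lst) (lst.eraseIdx k) = true := by
        rintro ⟨k, hk, hsk⟩
        by_cases hkj : k = j
        · subst hkj; rw [h1] at hsk; simp at hsk
        · by_cases hkj1 : k = j + 1
          · subst hkj1; rw [h2] at hsk; simp at hsk
          · rw [erase_not_sorted (ascOf lst) lst j k hjn hbad hk hkj hkj1] at hsk; simp at hsk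
      simp [decide_eq_false hex, h1, h2]

theorem A_char (lst : List Int) : almost_sorted lst = rhsFun lst := by
  unfold almost_sorted rhsFun
  dsimp only
  simp only [PySem.List.slice_to_neg_one, PySem.List.slice_from_one, zip_dropLast_tail]
  -- the direction flag
  have hct : (((lst.zip lst.tail).map (fun p => decide (p.2 - p.1 > 0))).count true)
      = (lst.zip lst.tail).countP (fun p => decide (p.1 < p.2)) := by
    rw [List.count_eq_countP, List.countP_map]
    apply List.countP_congr
    intro p _
    simp [Int.sub_pos]
  have hcf : (((lst.zip lst.tail).map (fun p => decide (p.2 - p.1 > 0))).count false)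
      = (lst.zip lst.tail).length - (lst.zip lst.tail).countP (fun p => decide (p.1 < p.2)) := by
    have hlen := List.length_eq_countP_add_countP (fun p : Int × Int => decide (p.1 < p.2))
      (l := lst.zip lst.tail)
    rw [List.count_eq_countP, List.countP_map]
    have : List.countP ((fun x => x == false) ∘ fun p : Int × Int => decide (p.2 - p.1 > 0)) (lst.zip lst.tail)
        = List.countP (fun p : Int × Int => decide ¬ (decide (p.1 < p.2)) = true) (lst.zip lst.tail) := by
      apply List.countP_congr
      intro p _
      simp [Int.sub_pos]
    rw [this]
    omega
  rw [hct, hcf]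
  have hr : (if (lst.zip lst.tail).length - (lst.zip lst.tail).countP (fun p => decide (p.1 < p.2))
      < (lst.zip lst.tail).countP (fun p => decide (p.1 < p.2)) then false else true) = !(ascOf lst) := by
    unfold ascOf
    by_cases hc : (lst.zip lst.tail).length - (lst.zip lst.tail).countP (fun p => decide (p.1 < p.2))
      < (lst.zip lst.tail).countP (fun p => decide (p.1 < p.2))
    · rw [if_pos hc, decide_eq_true hc]; rfl
    · rw [if_neg hc, decide_eq_false hc]; rfl
  rw [hr]
  by_cases hs : lst = PySem.List.sorted lst (fun x => x) (!(ascOf lst))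
  · rw [if_pos hs, if_pos ((sorted_eq_iff_sortedW (ascOf lst) lst).mp hs)]
  · rw [if_neg hs]
    have hsw : sortedW (ascOf lst) lst = false := by
      rw [← Bool.not_eq_true]
      intro hc
      exact hs ((sorted_eq_iff_sortedW (ascOf lst) lst).mpr hc)
    rw [if_neg (show ¬ sortedW (ascOf lst) lst = true by simp [hsw])]
    -- not sorted ⟹ at least two elements
    have hn2 : 2 ≤ lst.length := by
      by_contra hc
      rw [Bool.eq_false_iff] at hsw
      apply hsw
      rw [sortedW_iff]
      intro i hi
      omega
    by_cases ha : (PySem.List.pyRange 0 ((lst.length : Int) - 1) 1).any (fun i =>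
        decide ((PySem.List.slice lst none (some i) ++ PySem.List.slice lst (some (i + 1)) none)
          = PySem.List.sorted (PySem.List.slice lst none (some i) ++ PySem.List.slice lst (some (i + 1)) none)
            (fun x => x) (!(ascOf lst)))) = true
    · rw [if_pos ha]
      rw [List.any_eq_true] at ha
      obtain ⟨i, hmem, hp⟩ := ha
      rw [PySem.List.mem_pyRange_one] at hmem
      obtain ⟨h0, hlt⟩ := hmem
      rw [slice_erase lst i h0] at hp
      rw [decide_eq_true_eq, sorted_eq_iff_sortedW] at hp
      have hk : i.toNat < lst.length := by omega
      symm
      rw [decide_eq_true_eq]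
      exact ⟨i.toNat, hk, hp⟩
    · rw [if_neg ha]
      have hnone : ∀ k, k < lst.length - 1 → sortedW (ascOf lst) (lst.eraseIdx k) = false := by
        intro k hk
        rw [← Bool.not_eq_true]
        intro hc
        apply ha
        rw [List.any_eq_true]
        refine ⟨(k : Int), ?_, ?_⟩
        · rw [PySem.List.mem_pyRange_one]
          constructor
          · exact Int.natCast_nonneg k
          · omega
        · rw [slice_erase lst (k : Int) (Int.natCast_nonneg k), Int.toNat_natCast,
            decide_eq_true_eq, sorted_eq_iff_sortedW]
          exact hc
      rw [dropLast_erase]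
      by_cases hlast : sortedW (ascOf lst) (lst.eraseIdx (lst.length - 1)) = true
      · rw [decide_eq_true ((sorted_eq_iff_sortedW _ _).mpr hlast)]
        symm
        rw [decide_eq_true_eq]
        exact ⟨lst.length - 1, by omega, hlast⟩
      · rw [Bool.not_eq_true] at hlast
        have h1 : ¬ (lst.eraseIdx (lst.length - 1)
            = PySem.List.sorted (lst.eraseIdx (lst.length - 1)) (fun x => x) (!(ascOf lst))) := by
          intro hc
          rw [(sorted_eq_iff_sortedW _ _).mp hc] at hlast
          simp at hlast
        rw [decide_eq_false h1]
        symm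
        rw [decide_eq_false_iff_not]
        rintro ⟨k, hk, hsk⟩
        by_cases hke : k = lst.length - 1
        · subst hke; rw [hlast] at hsk; simp at hsk
        · rw [hnone k (by omega)] at hsk; simp at hsk

-- ===== VERDICT (by name: the statement is the Claim_ definition above) =====
theorem almost_sorted_spec : Claim_equal_almost_sorted := by
  intro lst _
  unfold Spec_almost_sorted
  rw [A_char, B_char]
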